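-- pv_equiv track=rewrite | github.com/helen-silv4/lema_bombeamento | lema.py | pertence_linguagem
-- ===== SOURCE A (Python) =====
-- def pertence_linguagem(w):
--     # exemplo: linguagem L = { a^n b^n | n ≥ 0 }, que NÃO é regular
--     # a função retorna True se a palavra estiver na linguagem, senão False
--
--     a_count = 0
--     b_count = 0
--     fase_b = False
--
--     for c in w:
--         if c == 'a':
--             if fase_b:
--                 return False
--             a_count += 1
--         elif c == 'b':
--             fase_b = True
--             b_count += 1
--         else:
--             return False  # símbolo inválido
--
--     return a_count == b_count
-- ===== SOURCE B (Python) =====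
-- def pertence_linguagem(w):
--     # B: count the leading run of 'a's, then check the rest is exactly that many 'b's
--     i = 0
--     while i < len(w) and w[i] == 'a':
--         i += 1
--     return w[i:] == 'b' * i
-- ===== Notes on version B (the rewrite author's own statement) =====
-- stated objective: simpler
-- what changed: Replaces A's counter/phase-flag state machine over every character by a leading-'a' prefix scan followed by a single bulk comparison of the suffix against 'b'*i.
import Mathlib
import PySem

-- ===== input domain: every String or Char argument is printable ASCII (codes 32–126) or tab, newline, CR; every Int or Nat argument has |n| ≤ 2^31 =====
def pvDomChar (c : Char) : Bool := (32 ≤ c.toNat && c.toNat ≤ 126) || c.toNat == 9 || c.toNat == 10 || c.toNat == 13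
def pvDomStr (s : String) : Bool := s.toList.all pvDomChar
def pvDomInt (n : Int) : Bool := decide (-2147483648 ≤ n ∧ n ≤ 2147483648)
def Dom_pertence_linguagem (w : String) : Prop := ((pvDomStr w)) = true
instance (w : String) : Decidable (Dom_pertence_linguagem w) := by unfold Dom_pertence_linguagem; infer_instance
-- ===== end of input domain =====

-- B replaces A's counter/phase-flag state machine by a leading-'a' prefix scan
-- plus one bulk comparison of the suffix with 'b'*i (objective: simpler).
-- ===== PORT A =====
-- the for-loop over w with state (a_count, b_count, fase_b); early returns become `false`
def pvLoopA : List Char → Int → Int → Bool → Bool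
  | [], a_count, b_count, _ => a_count == b_count
  | c :: cs, a_count, b_count, fase_b =>
    if c = 'a' then
      if fase_b then false else pvLoopA cs (a_count + 1) b_count fase_b
    else if c = 'b' then
      pvLoopA cs a_count (b_count + 1) true
    else
      false

def pertence_linguagem (w : String) : Bool :=
  pvLoopA w.toList 0 0 false

-- ===== PORT B =====
-- the while-loop advancing i over the leading 'a's
def pvLeadA : List Char → Nat
  | [] => 0
  | c :: cs => if c = 'a' then pvLeadA cs + 1 else 0

def pertence_linguagem_alt (w : String) : Bool :=
  let l := w.toList
  let i := pvLeadA l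
  l.drop i == List.replicate i 'b'

-- ===== PRECONDITION & SPEC =====
def Spec_pertence_linguagem (w : String) (out : Bool) : Prop := out = pertence_linguagem_alt w
instance (w : String) (out : Bool) : Decidable (Spec_pertence_linguagem w out) := by unfold Spec_pertence_linguagem; infer_instance

-- ===== CLAIM (what is proved, stated in full; the proofs are below) =====
def Claim_equal_pertence_linguagem : Prop := ∀ (w : String), Dom_pertence_linguagem w → Spec_pertence_linguagem w (pertence_linguagem w)

-- ===== LEMMAS AND PROOFS =====

-- a list equals `replicate n 'b'` iff it has length n and is all 'b's
lemma pv_eq_replicate (l : List Char) (n : Nat) :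
    (l == List.replicate n 'b') = decide (l.length = n ∧ ∀ c ∈ l, c = 'b') := by
  rw [Bool.eq_iff_iff]
  simp [List.eq_replicate_iff]

-- phase-b loop: accepts iff the rest is all 'b's and a_count catches up with b_count
lemma pv_loopB (cs : List Char) (a b : Int) :
    pvLoopA cs a b true = ((decide (∀ c ∈ cs, c = 'b')) && (a == b + cs.length)) := by
  induction cs generalizing b with
  | nil => simp [pvLoopA]
  | cons c cs ih =>
    by_cases hc : c = 'a'
    · subst hc; simp [pvLoopA]
    · by_cases hb : c = 'b'
      · subst hb
        simp only [pvLoopA, ih, List.forall_mem_cons, List.length_cons]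
        rw [show (b + 1) + (cs.length : Int) = b + ((cs.length : Int) + 1) by ring]
        simp
      · simp [pvLoopA, hc, hb]

-- phase-a loop against B's shape, generalized over pending a_count
lemma pv_key (cs : List Char) (a : Int) (h : 0 ≤ a) :
    pvLoopA cs a 0 false = (cs.drop (pvLeadA cs) == List.replicate (a.toNat + pvLeadA cs) 'b') := by
  induction cs generalizing a with
  | nil =>
    simp only [pvLoopA, pvLeadA, List.drop_nil, pv_eq_replicate]
    rw [Bool.eq_iff_iff]
    simp
    omega
  | cons c cs ih =>
    by_cases hc : c = 'a'
    · subst hc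
      rw [show pvLeadA ('a' :: cs) = pvLeadA cs + 1 from by simp [pvLeadA],
        show pvLoopA ('a' :: cs) a 0 false = pvLoopA cs (a + 1) 0 false from by simp [pvLoopA],
        List.drop_succ_cons, ih (a + 1) (by omega),
        show (a + 1).toNat + pvLeadA cs = a.toNat + (pvLeadA cs + 1) by omega]
    · by_cases hb : c = 'b'
      · subst hb
        rw [show pvLoopA ('b' :: cs) a 0 false = pvLoopA cs a (0 + 1) true from by
              simp [pvLoopA],
            show pvLeadA ('b' :: cs) = 0 from by simp [pvLeadA],
            pv_loopB, pv_eq_replicate, Bool.eq_iff_iff]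
        simp only [Nat.add_zero, List.drop_zero, List.length_cons, List.forall_mem_cons,
          Bool.and_eq_true, decide_eq_true_eq, beq_iff_eq, true_and]
        constructor
        · rintro ⟨h1, h2⟩; exact ⟨by omega, h1⟩
        · rintro ⟨h1, h2⟩; exact ⟨h2, by omega⟩
      · simp [pvLoopA, pvLeadA, hc, hb, pv_eq_replicate]

-- ===== VERDICT (by name: the statement is the Claim_ definition above) =====
theorem pertence_linguagem_spec : Claim_equal_pertence_linguagem := by
  intro w _
  unfold Spec_pertence_linguagem pertence_linguagem pertence_linguagem_alt
  simpa using pv_key w.toList 0 le_rfl
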